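-- pv_equiv track=rewrite | github.com/ishak-dev/Python-Tasks | Vjezba Final II/count letter.py | function
-- ===== SOURCE A (Python) =====
-- def function(x):
--     y = {}
--     r ={}
--     for char in x:
--         if char != " ":
--             if char in y:
--                 y[char] = y[char] + 1
--             else:
--                 y[char] = 1
--     for key in sorted(y.keys()):
--         r[key] = y[key]
--
--     return r
-- ===== SOURCE B (Python) =====
-- def function(x):
--     # filter out spaces, sort, then count consecutive runs into a dict
--     # that is built already in sorted key order
--     chars = sorted(c for c in x if c != " ")
--     r = {}
--     n = len(chars)
--     i = 0
--     while i < n: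
--         c = chars[i]
--         j = i + 1
--         while j < n and chars[j] == c:
--             j += 1
--         r[c] = j - i
--         i = j
--     return r
-- ===== Notes on version B (the rewrite author's own statement) =====
-- stated objective: alternative
-- what changed: Replaces A's two-phase hash-count-then-sort-the-keys with filter-out-spaces, sort the characters, and a single run-length pass over the sorted sequence that emits each char with its run length, building the dict already in sorted key order.
import Mathlib
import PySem

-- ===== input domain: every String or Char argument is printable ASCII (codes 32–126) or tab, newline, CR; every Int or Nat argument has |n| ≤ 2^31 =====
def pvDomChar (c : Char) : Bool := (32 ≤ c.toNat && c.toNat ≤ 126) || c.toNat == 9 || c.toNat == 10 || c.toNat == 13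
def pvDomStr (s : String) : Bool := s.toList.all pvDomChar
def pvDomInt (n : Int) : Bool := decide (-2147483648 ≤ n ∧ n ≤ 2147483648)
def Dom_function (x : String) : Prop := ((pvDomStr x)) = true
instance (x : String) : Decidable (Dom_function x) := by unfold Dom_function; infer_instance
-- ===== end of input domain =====

-- B replaces A's hash-count-then-sort-the-keys two-phase structure by filter spaces,
-- sort the characters, then one run-length pass over the sorted sequence (objective: alternative).

-- ===== PORT A =====
-- first loop: count non-space chars into dict y; second loop: re-insert in sorted key order
def function (x : String) : List (String × Int) :=
  let y : PySem.Dict String Int :=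
    x.toList.foldl (fun d c =>
      if c ≠ ' ' then
        if d.contains (String.singleton c) then
          d.insert (String.singleton c) (d.getD (String.singleton c) 0 + 1)
        else
          d.insert (String.singleton c) 1
      else d) PySem.Dict.empty
  let r : PySem.Dict String Int :=
    (PySem.List.sorted (PySem.Dict.keys y) (fun k => k) false).foldl
      (fun d k => d.insert k (y.getD k 0)) PySem.Dict.empty
  r.items

-- ===== PORT B =====
-- run-length pass over an already-sorted list: one entry per run (char, run length);
-- ports Source B's outer while loop (inner run scan = takeWhile/dropWhile on the rest)
def pvRuns : List String → List (String × Int)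
  | [] => []
  | c :: rest =>
      (c, ((rest.takeWhile (· == c)).length : Int) + 1) :: pvRuns (rest.dropWhile (· == c))
termination_by l => l.length
decreasing_by
  exact Nat.lt_succ_of_le (List.length_dropWhile_le (· == c) rest)

def function_alt (x : String) : List (String × Int) :=
  let chars : List String :=
    PySem.List.sorted ((x.toList.filter (fun c => c ≠ ' ')).map String.singleton) (fun k => k) false
  pvRuns chars

-- ===== PRECONDITION & SPEC =====
def Spec_function (x : String) (out : List (String × Int)) : Prop := out = function_alt x
instance (x : String) (out : List (String × Int)) : Decidable (Spec_function x out) := by unfold Spec_function; infer_instance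

-- ===== CLAIM (what is proved, stated in full; the proofs are below) =====
def Claim_equal_function : Prop := ∀ (x : String), Dom_function x → Spec_function x (function x)

-- ===== LEMMAS AND PROOFS =====

-- on a sorted list, every element after the leading run of c is strictly greater than c
lemma pv_lt_of_mem_dropWhile (c : String) (rest : List String)
    (hc : ∀ a ∈ rest, c ≤ a) (hp : rest.Pairwise (· ≤ ·)) :
    ∀ a ∈ rest.dropWhile (· == c), c < a := by
  intro a ha
  rcases hd : rest.dropWhile (· == c) with _ | ⟨h, d'⟩
  · simp [hd] at ha
  · have hhp : (h :: d').Pairwise (· ≤ ·) :=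
      hp.sublist (hd ▸ List.dropWhile_sublist (· == c))
    have hhm : h ∈ rest := (List.dropWhile_sublist (· == c)).subset (hd ▸ List.mem_cons_self)
    have hhne : ¬ (h == c) = true := by
      have := List.head_dropWhile_not (· == c) (l := rest) (by simp [hd])
      simpa [hd] using this
    have hne' : h ≠ c := fun hEq => hhne (by rw [hEq]; exact beq_self_eq_true c)
    have hch : c < h := lt_of_le_of_ne (hc h hhm) (Ne.symm hne')
    rw [hd] at ha
    rcases List.mem_cons.mp ha with rfl | ha'
    · exact hch
    · exact lt_of_lt_of_le hch ((List.pairwise_cons.mp hhp).1 a ha')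

-- the run-length pass on a sorted list: strictly increasing distinct keys, covering exactly
-- the elements, each paired with its count
lemma pvRuns_spec (s : List String) (hs : s.Pairwise (· ≤ ·)) :
    ((pvRuns s).map Prod.fst).Pairwise (· < ·) ∧
    (∀ a, a ∈ (pvRuns s).map Prod.fst ↔ a ∈ s) ∧
    pvRuns s = ((pvRuns s).map Prod.fst).map (fun k => (k, (s.count k : Int))) := by
  induction s using pvRuns.induct with
  | case1 => simp [pvRuns]
  | case2 c rest ih =>
    have hc : ∀ a ∈ rest, c ≤ a := (List.pairwise_cons.mp hs).1
    have hrp : rest.Pairwise (· ≤ ·) := (List.pairwise_cons.mp hs).2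
    have hdp : (rest.dropWhile (· == c)).Pairwise (· ≤ ·) :=
      hrp.sublist (List.dropWhile_sublist (· == c))
    obtain ⟨ih1, ih2, ih3⟩ := ih hdp
    have hlt : ∀ a ∈ rest.dropWhile (· == c), c < a := pv_lt_of_mem_dropWhile c rest hc hrp
    have htw : ∀ a ∈ rest.takeWhile (· == c), a = c := by
      intro a ha; simpa using List.mem_takeWhile_imp ha
    have hsplit : rest.takeWhile (· == c) ++ rest.dropWhile (· == c) = rest :=
      List.takeWhile_append_dropWhile
    -- count of c in the whole list is the leading run length plus one
    have hcnt_c : (c :: rest).count c = (rest.takeWhile (· == c)).length + 1 := by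
      have h0 : (rest.dropWhile (· == c)).count c = 0 :=
        List.count_eq_zero.mpr (fun hm => lt_irrefl c (hlt c hm))
      have h1 : (rest.takeWhile (· == c)).count c = (rest.takeWhile (· == c)).length :=
        List.count_eq_length.mpr (fun b hb => (htw b hb).symm)
      calc (c :: rest).count c
          = ((rest.takeWhile (· == c)).count c + (rest.dropWhile (· == c)).count c) + 1 := by
            conv_lhs => rw [show rest = rest.takeWhile (· == c) ++ rest.dropWhile (· == c) from hsplit.symm]
            rw [List.count_cons_self, List.count_append]
        _ = (rest.takeWhile (· == c)).length + 1 := by rw [h0, h1]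
    -- counts of later keys are unchanged by the leading run
    have hcnt_k : ∀ k ∈ (pvRuns (rest.dropWhile (· == c))).map Prod.fst,
        (c :: rest).count k = (rest.dropWhile (· == c)).count k := by
      intro k hk
      have hkd : k ∈ rest.dropWhile (· == c) := (ih2 k).mp hk
      have hck : c < k := hlt k hkd
      have hkc : k ≠ c := ne_of_gt hck
      have hkt : (rest.takeWhile (· == c)).count k = 0 :=
        List.count_eq_zero.mpr (fun hm => hkc (htw k hm))
      conv_lhs => rw [show rest = rest.takeWhile (· == c) ++ rest.dropWhile (· == c) from hsplit.symm]
      rw [List.count_cons_of_ne (Ne.symm hkc), List.count_append, hkt, Nat.zero_add]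
    refine ⟨?_, ?_, ?_⟩
    · rw [pvRuns]
      simp only [List.map_cons, List.pairwise_cons]
      exact ⟨fun k hk => hlt k ((ih2 k).mp hk), ih1⟩
    · intro a
      rw [pvRuns]
      simp only [List.map_cons, List.mem_cons, ih2]
      constructor
      · rintro (rfl | h)
        · exact .inl rfl
        · exact .inr ((List.dropWhile_sublist (· == c)).subset h)
      · rintro (rfl | h)
        · exact .inl rfl
        · rw [← hsplit] at h
          rcases List.mem_append.mp h with h | h
          · exact .inl (htw a h)
          · exact .inr h
    · rw [pvRuns]
      simp only [List.map_cons]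
      refine List.cons_eq_cons.mpr ⟨?_, ?_⟩
      · rw [hcnt_c]; push_cast; rfl
      · calc pvRuns (rest.dropWhile (· == c))
              = ((pvRuns (rest.dropWhile (· == c))).map Prod.fst).map
                  (fun k => (k, ((rest.dropWhile (· == c)).count k : Int))) := ih3
          _ = ((pvRuns (rest.dropWhile (· == c))).map Prod.fst).map
                  (fun k => (k, ((c :: rest).count k : Int))) :=
              List.map_congr_left (fun k hk => by rw [hcnt_k k hk])

-- A's first loop is Counter over the filtered singleton strings
lemma pv_first_loop (x : String) :
    x.toList.foldl (fun d c =>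
      if c ≠ ' ' then
        if d.contains (String.singleton c) then
          d.insert (String.singleton c) (d.getD (String.singleton c) 0 + 1)
        else
          d.insert (String.singleton c) 1
      else d) PySem.Dict.empty
    = PySem.Dict.counter ((x.toList.filter (fun c => c ≠ ' ')).map String.singleton) := by
  rw [← PySem.Dict.foldl_insert_getD_add_one_eq_counter, List.foldl_map, List.foldl_filter]
  congr 1
  funext d c
  by_cases hsp : c = ' '
  · simp [hsp]
  · by_cases hco : d.contains (String.singleton c)
    · simp [hsp, hco]
    · have h0 : d.getD (String.singleton c) 0 = 0 :=
        PySem.Dict.getD_of_not_contains d 0 (by simpa using hco)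
      simp [hsp, hco, h0]

theorem pv_main (x : String) : function x = function_alt x := by
  have hy := pv_first_loop x
  simp only [function, function_alt]
  rw [hy, PySem.Dict.keys_counter]
  set l : List String := (x.toList.filter (fun c => c ≠ ' ')).map String.singleton with hl
  set s : List String := PySem.List.sorted l (fun k => k) false with hsdef
  have hs : s.Pairwise (· ≤ ·) := PySem.List.sorted_pairwise l (fun k => k)
  obtain ⟨h1, h2, h3⟩ := pvRuns_spec s hs
  have hnd : ((pvRuns s).map Prod.fst).Nodup := h1.imp ne_of_lt
  -- the sorted key list IS the key list of the run-length pass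
  have hperm : ((pvRuns s).map Prod.fst).Perm (PySem.Set.ofList l) := by
    refine (List.perm_ext_iff_of_nodup hnd ?_).mpr ?_
    · rw [← PySem.List.dedup_eq_ofList]; exact PySem.List.nodup_dedup l
    · intro a
      rw [h2, ← PySem.List.dedup_eq_ofList, PySem.List.mem_dedup]
      exact PySem.List.mem_sorted l (fun k => k) false a
  have hkeys : PySem.List.sorted (PySem.Set.ofList l) (fun k => k) false
      = (pvRuns s).map Prod.fst :=
    PySem.List.sorted_eq_of_perm_of_pairwise_lt _ _ _ hperm h1
  rw [hkeys]
  have hfresh := PySem.Dict.items_foldl_insert_fresh ((pvRuns s).map Prod.fst)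
      (fun k => k) (fun k => (PySem.Dict.counter l).getD k 0) PySem.Dict.empty
      (fun a _ => by simp) (by simpa using hnd)
  rw [hfresh]
  have hemp : (PySem.Dict.empty : PySem.Dict String Int).items = [] := rfl
  rw [hemp, List.nil_append]
  conv_rhs => rw [h3]
  refine List.map_congr_left ?_
  intro k hk
  have hc2 : (PySem.Dict.counter l).getD k 0 = (l.count k : Int) := PySem.Dict.getD_counter l k
  have hc3 : l.count k = s.count k := ((PySem.List.sorted_perm l (fun k => k) false).count_eq k).symm
  simp only [hc2, hc3]

-- ===== VERDICT (by name: the statement is the Claim_ definition above) =====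
theorem function_spec : Claim_equal_function := by
  intro x _
  unfold Spec_function
  exact pv_main x
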